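-- pv_equiv track=rewrite | github.com/overload127/python_mfti | algo/lab14/tusk_4.py | take_token
-- ===== SOURCE A (Python) =====
-- def take_token(str_to_token):
--     mas = []
--     str_tmp = ''
--     for ch in str_to_token:
--         if ch.isdigit():
--             str_tmp = ''.join((str_tmp, ch))
--         else:
--             if len(str_tmp) != 0:
--                 mas.append(str_tmp)
--                 str_tmp = ''
--             mas.append(ch)
--     if len(str_tmp) != 0:
--         mas.append(str_tmp)
--
--     return mas
-- ===== SOURCE B (Python) =====
-- def take_token(str_to_token):
--     result = []
--     i = 0
--     n = len(str_to_token)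
--     while i < n:
--         if str_to_token[i].isdigit():
--             j = i
--             while j < n and str_to_token[j].isdigit():
--                 j += 1
--             result.append(str_to_token[i:j])
--             i = j
--         else:
--             result.append(str_to_token[i])
--             i += 1
--     return result
-- ===== Notes on version B (the rewrite author's own statement) =====
-- stated objective: alternative
-- what changed: Replaces A's accumulate-and-flush state machine (building a pending digit buffer char by char and flushing it on non-digits and at the end) with a lookahead scanner that, at each digit, advances an index to the end of the maximal digit run and slices it out in one step.
import Mathlib
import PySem

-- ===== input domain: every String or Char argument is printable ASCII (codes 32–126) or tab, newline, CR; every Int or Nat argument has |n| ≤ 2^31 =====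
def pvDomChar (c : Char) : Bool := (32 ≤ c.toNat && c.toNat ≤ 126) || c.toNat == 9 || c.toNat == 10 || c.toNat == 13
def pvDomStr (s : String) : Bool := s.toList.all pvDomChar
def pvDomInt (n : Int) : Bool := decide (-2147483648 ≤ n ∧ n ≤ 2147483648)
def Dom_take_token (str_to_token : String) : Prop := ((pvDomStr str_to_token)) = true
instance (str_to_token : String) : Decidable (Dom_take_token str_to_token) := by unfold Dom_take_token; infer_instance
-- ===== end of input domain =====

-- B replaces A's accumulate-and-flush state machine with a lookahead scanner that slices
-- out each maximal digit run in one step (objective: alternative, same cost).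

-- ===== PORT A =====
-- A's for-loop with state (mas, str_tmp); str_tmp accumulates the pending digit run,
-- flushed before a non-digit and after the loop.
def take_token_loop (mas : List String) (tmp : List Char) : List Char → List String
  | [] => if tmp.length ≠ 0 then mas ++ [String.ofList tmp] else mas
  | ch :: rest =>
      if PySem.Chars.isdigit ch then
        take_token_loop mas (tmp ++ [ch]) rest
      else
        if tmp.length ≠ 0 then
          take_token_loop (mas ++ [String.ofList tmp] ++ [String.ofList [ch]]) [] rest
        else
          take_token_loop (mas ++ [String.ofList [ch]]) [] rest

def take_token (str_to_token : String) : List String :=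
  take_token_loop [] [] str_to_token.toList

-- ===== PORT B =====
-- Source B's index scanner: on a digit, advance to the end of the digit run (the slice
-- str_to_token[i:j] is the maximal digit prefix = takeWhile) and emit it as one token;
-- on a non-digit, emit the single character.
def take_token_scan : List Char → List String
  | [] => []
  | c :: rest =>
      if PySem.Chars.isdigit c then
        String.ofList ((c :: rest).takeWhile PySem.Chars.isdigit)
          :: take_token_scan ((c :: rest).dropWhile PySem.Chars.isdigit)
      else
        String.ofList [c] :: take_token_scan rest
  termination_by l => l.length
  decreasing_by
    · simp only [List.dropWhile, *, List.length_cons]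
      exact Nat.lt_succ_of_le (List.length_dropWhile_le _ _)
    · simp

def take_token_alt (str_to_token : String) : List String :=
  take_token_scan str_to_token.toList

-- ===== PRECONDITION & SPEC =====
def Spec_take_token (str_to_token : String) (out : List String) : Prop := out = take_token_alt str_to_token
instance (str_to_token : String) (out : List String) : Decidable (Spec_take_token str_to_token out) := by unfold Spec_take_token; infer_instance

-- ===== CLAIM (what is proved, stated in full; the proofs are below) =====
def Claim_equal_take_token : Prop := ∀ (str_to_token : String), Dom_take_token str_to_token → Spec_take_token str_to_token (take_token str_to_token)

-- ===== LEMMAS AND PROOFS =====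

lemma scan_nil : take_token_scan [] = [] := by
  rw [take_token_scan]

lemma scan_cons (c : Char) (rest : List Char) :
    take_token_scan (c :: rest) =
      if PySem.Chars.isdigit c then
        String.ofList ((c :: rest).takeWhile PySem.Chars.isdigit)
          :: take_token_scan ((c :: rest).dropWhile PySem.Chars.isdigit)
      else
        String.ofList [c] :: take_token_scan rest := by
  rw [take_token_scan]

-- How B continues when A's loop still holds a pending buffer `tmp`.
def take_token_pending (tmp : List Char) (l : List Char) : List String :=
  if tmp = [] then take_token_scan l
  else String.ofList (tmp ++ l.takeWhile PySem.Chars.isdigit)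
         :: take_token_scan (l.dropWhile PySem.Chars.isdigit)

lemma take_token_loop_eq (l : List Char) : ∀ (mas : List String) (tmp : List Char),
    take_token_loop mas tmp l = mas ++ take_token_pending tmp l := by
  induction l with
  | nil =>
    intro mas tmp
    by_cases h : tmp = [] <;>
      simp [take_token_loop, take_token_pending, h, scan_nil]
  | cons c rest ih =>
    intro mas tmp
    by_cases hd : PySem.Chars.isdigit c
    · rw [take_token_loop, if_pos hd, ih]
      by_cases h : tmp = [] <;>
        simp [take_token_pending, h, scan_cons, List.takeWhile, List.dropWhile, hd]
    · by_cases h : tmp = []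
      · rw [take_token_loop, if_neg hd, if_neg (by simp [h]), ih]
        simp [take_token_pending, h, scan_cons, hd]
      · rw [take_token_loop, if_neg hd, if_pos (by simp [h]), ih]
        simp [take_token_pending, h, scan_cons, List.takeWhile, List.dropWhile, hd]

-- ===== VERDICT (by name: the statement is the Claim_ definition above) =====
theorem take_token_spec : Claim_equal_take_token := by
  intro s _
  unfold Spec_take_token take_token take_token_alt
  rw [take_token_loop_eq]
  simp [take_token_pending]
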